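-- pv_equiv track=rewrite | github.com/nitingz9/il-fiscal-agent | il_fiscal_agent/agents/root_agent.py | _is_valid_entity_code
-- ===== SOURCE A (Python) =====
-- def _is_valid_entity_code(code: str) -> bool:
--     """Validate entity code format (XXX/YYY/ZZ)."""
--     if not code:
--         return False
--     parts = code.split("/")
--     if len(parts) != 3:
--         return False
--     # Basic validation - all parts should be numeric-ish
--     try:
--         for part in parts:
--             if not part.strip():
--                 return False
--     except:
--         return False
--     return True
-- ===== SOURCE B (Python) =====
-- def _is_valid_entity_code(code: str) -> bool:
--     """Validate entity code format (XXX/YYY/ZZ) in one pass, without splitting."""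
--     ok = False      # current segment contains a non-whitespace character
--     segs = 0        # number of '/' separators seen so far
--     for ch in code:
--         if ch == '/':
--             if not ok:
--                 return False
--             segs += 1
--             ok = False
--         elif not ch.isspace():
--             ok = True
--     return segs == 2 and ok
-- ===== Notes on version B (the rewrite author's own statement) =====
-- stated objective: alternative
-- what changed: Replaces splitting on the slash character into a parts list plus a per-part strip()-emptiness loop by a single left-to-right scan that counts slash separators and tracks whether the current segment contains a non-whitespace character, with no intermediate list.
import Mathlib
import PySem

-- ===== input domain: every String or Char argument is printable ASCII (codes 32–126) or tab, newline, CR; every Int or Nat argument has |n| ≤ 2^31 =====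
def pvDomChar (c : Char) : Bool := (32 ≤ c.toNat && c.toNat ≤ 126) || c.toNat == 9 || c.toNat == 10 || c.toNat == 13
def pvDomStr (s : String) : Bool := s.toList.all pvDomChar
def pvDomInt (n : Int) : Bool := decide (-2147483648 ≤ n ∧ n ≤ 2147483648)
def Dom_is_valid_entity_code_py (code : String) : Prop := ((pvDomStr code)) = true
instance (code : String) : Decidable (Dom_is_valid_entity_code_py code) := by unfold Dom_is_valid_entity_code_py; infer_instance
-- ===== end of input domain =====

-- B replaces A's split-on-slash + per-part strip loop by a single left-to-right scan that counts
-- separators and tracks whether the current segment has a non-whitespace character (objective: alternative).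

-- ===== PORT A =====
-- early-return loop over the parts: 'if not part.strip(): return False'
def pvStripBlankLoop : List (List Char) → Bool
  | [] => true
  | p :: rest => if PySem.Chars.strip p = [] then false else pvStripBlankLoop rest

def is_valid_entity_code_py (code : String) : Bool :=
  if code.toList.isEmpty then false   -- 'if not code'
  else
    let parts := PySem.Chars.splitOn code.toList ['/']
    if parts.length ≠ 3 then false
    else pvStripBlankLoop parts       -- the try/except body; nothing in it can raise

-- ===== PORT B =====
-- one pass: ok = current segment has a non-whitespace char, segs = '/' count; early return on a blank closed segment
def pvScan : List Char → Bool → Nat → Bool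
  | [], ok, segs => segs == 2 && ok
  | c :: rest, ok, segs =>
    if c = '/' then
      if !ok then false else pvScan rest false (segs + 1)
    else if PySem.Chars.isspace c then pvScan rest ok segs
    else pvScan rest true segs

def is_valid_entity_code_py_alt (code : String) : Bool :=
  pvScan code.toList false 0

-- ===== PRECONDITION & SPEC =====
def Spec_is_valid_entity_code_py (code : String) (out : Bool) : Prop := out = is_valid_entity_code_py_alt code
instance (code : String) (out : Bool) : Decidable (Spec_is_valid_entity_code_py code out) := by unfold Spec_is_valid_entity_code_py; infer_instance

-- ===== CLAIM (what is proved, stated in full; the proofs are below) =====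
def Claim_equal_is_valid_entity_code_py : Prop := ∀ (code : String), Dom_is_valid_entity_code_py code → Spec_is_valid_entity_code_py code (is_valid_entity_code_py code)

-- ===== LEMMAS AND PROOFS =====

-- the parts of cs split at '/', as a direct structural recursion (proof-side model of splitOn)
def pvParts : List Char → List (List Char)
  | [] => [[]]
  | c :: cs => if c = '/' then [] :: pvParts cs
               else (c :: (pvParts cs).headI) :: (pvParts cs).tail

-- a part is non-blank after strip iff it contains a non-whitespace character
def pvNB (p : List Char) : Bool := p.any (fun c => !PySem.Chars.isspace c)

theorem pvParts_ne_nil (cs : List Char) : pvParts cs ≠ [] := by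
  cases cs with
  | nil => simp [pvParts]
  | cons c cs => simp only [pvParts]; split <;> simp

theorem pvGo_cons (fuel : Nat) (c : Char) (rest cur : List Char) (acc : List (List Char)) :
    PySem.Chars.splitOn.go ['/'] (fuel+1) (c::rest) cur acc =
      if c = '/' then PySem.Chars.splitOn.go ['/'] fuel rest [] (cur.reverse :: acc)
      else PySem.Chars.splitOn.go ['/'] fuel rest (c::cur) acc := by
  rw [PySem.Chars.splitOn.go]
  by_cases hc : c = '/'
  · simp [List.isPrefixOf, hc]
  · simp [List.isPrefixOf, hc, Ne.symm hc]

theorem pvGo_nil (fuel : Nat) (cur : List Char) (acc : List (List Char)) :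
    PySem.Chars.splitOn.go ['/'] (fuel+1) [] cur acc = (cur.reverse :: acc).reverse := by
  rw [PySem.Chars.splitOn.go]
  omega

theorem pvGo_eq (fuel : Nat) : ∀ (l cur : List Char) (acc : List (List Char)), l.length < fuel →
    PySem.Chars.splitOn.go ['/'] fuel l cur acc =
      acc.reverse ++ (cur.reverse ++ (pvParts l).headI) :: (pvParts l).tail := by
  induction fuel with
  | zero => intro l cur acc h; omega
  | succ fuel ih =>
    intro l cur acc h
    cases l with
    | nil => simp [pvGo_nil, pvParts]
    | cons c rest =>
      rw [pvGo_cons]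
      by_cases hc : c = '/'
      · simp only [hc]
        rw [ih rest [] _ (by simpa using h)]
        have := pvParts_ne_nil rest
        cases hp : pvParts rest with
        | nil => exact absurd hp this
        | cons p ps => simp [pvParts]; exact hp.symm
      · rw [if_neg hc, ih rest (c::cur) acc (by simpa using Nat.lt_of_succ_lt_succ h)]
        simp [pvParts, hc]

theorem pvSplitOn_eq (cs : List Char) : PySem.Chars.splitOn cs ['/'] = pvParts cs := by
  unfold PySem.Chars.splitOn
  rw [pvGo_eq (cs.length + 1) cs [] [] (by omega)]
  have := pvParts_ne_nil cs
  cases hp : pvParts cs with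
  | nil => exact absurd hp this
  | cons p ps => simp

theorem pvStrip_nil_iff (p : List Char) :
    (PySem.Chars.strip p = []) ↔ pvNB p = false := by
  unfold PySem.Chars.strip PySem.Chars.rstrip PySem.Chars.lstrip pvNB
  simp only [List.reverse_eq_nil_iff, List.dropWhile_eq_nil_iff, List.mem_reverse,
    List.any_eq_false, Bool.not_eq_true', Bool.not_eq_false]
  constructor
  · intro h c hc
    rcases List.mem_append.1 ((List.takeWhile_append_dropWhile (p := PySem.Chars.isspace) (l := p)) ▸ hc) with h1 | h1
    · exact List.mem_takeWhile_imp h1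
    · exact h c h1
  · intro h c hc
    exact h c ((List.dropWhile_suffix _).subset hc)

theorem pvStripBlankLoop_eq (parts : List (List Char)) :
    pvStripBlankLoop parts = parts.all pvNB := by
  induction parts with
  | nil => rfl
  | cons p rest ih =>
    simp only [pvStripBlankLoop, List.all_cons]
    by_cases h : PySem.Chars.strip p = []
    · rw [if_pos h, (pvStrip_nil_iff p).1 h]; rfl
    · rw [if_neg h, ih]
      have : pvNB p = true := by
        cases hb : pvNB p
        · exact absurd ((pvStrip_nil_iff p).2 hb) h
        · rfl
      rw [this, Bool.true_and]

theorem pvScan_eq : ∀ (cs : List Char) (ok : Bool) (segs : Nat),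
    pvScan cs ok segs =
      (decide (segs + (pvParts cs).length = 3) && (ok || pvNB (pvParts cs).headI)
        && (pvParts cs).tail.all pvNB) := by
  intro cs
  induction cs with
  | nil =>
    intro ok segs
    have h : (segs == 2) = decide (segs + 1 = 3) := by
      by_cases hs : segs = 2 <;> simp [hs]
    simp [pvScan, pvParts, pvNB, h]
  | cons c rest ih =>
    intro ok segs
    have hne := pvParts_ne_nil rest
    cases hp : pvParts rest with
    | nil => exact absurd hp hne
    | cons p ps =>
      by_cases hc : c = '/'
      · subst hc
        cases ok with
        | false => simp [pvScan, pvParts, hp, pvNB]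
        | true =>
          rw [show pvScan ('/'::rest) true segs = pvScan rest false (segs+1) from by simp [pvScan]]
          rw [ih false (segs+1)]
          have hd : decide (segs + 1 + (ps.length + 1) = 3) = decide (segs + (ps.length + 1 + 1) = 3) := by
            by_cases h : segs + 1 + (ps.length + 1) = 3 <;> simp [h] <;> omega
          simp [pvParts, hp, hd, Bool.and_assoc]
      · have hstep : (if PySem.Chars.isspace c = true then pvScan rest ok segs
            else pvScan rest true segs) = pvScan rest (ok || !PySem.Chars.isspace c) segs := by
          cases hs : PySem.Chars.isspace c
          · cases ok <;> simp
          · simp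
        simp only [pvScan, pvParts, if_neg hc, hp, List.headI, List.tail_cons, List.length_cons]
        rw [hstep, ih, hp]
        simp only [List.headI, List.tail_cons, List.length_cons]
        simp only [pvNB, List.any_cons, Bool.or_assoc]
        rfl

-- ===== VERDICT (by name: the statement is the Claim_ definition above) =====
theorem is_valid_entity_code_py_spec : Claim_equal_is_valid_entity_code_py := by
  intro code _
  unfold Spec_is_valid_entity_code_py is_valid_entity_code_py is_valid_entity_code_py_alt
  rw [pvScan_eq code.toList false 0, pvSplitOn_eq]
  cases hl : code.toList with
  | nil => simp [pvParts, pvNB]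
  | cons c cs =>
    simp only [List.isEmpty_cons, if_neg (by decide : ¬ (false = true))]
    have hne := pvParts_ne_nil (c :: cs)
    cases hp : pvParts (c :: cs) with
    | nil => exact absurd hp hne
    | cons p ps =>
      rw [pvStripBlankLoop_eq]
      simp only [List.length_cons, List.all_cons, List.headI, List.tail_cons,
        Bool.false_or, Nat.zero_add]
      by_cases h3 : ps.length + 1 = 3
      · simp [h3]
      · simp [h3]
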